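-- pv_equiv track=rewrite | github.com/navid-naderi/EvoPool | download_exact_msas_with_a3m.py | filter_keys_for_download
-- ===== SOURCE A (Python) =====
-- from typing import Dict, List, Iterable
--
-- def filter_keys_for_download(keys: List[str], mode: str) -> List[str]:
--     """
--     mode:
--       - 'canonical': only '.../a3m/uniclust30.a3m' if present; otherwise take the first A3M file found
--       - 'all_a3m' : all files under '.../a3m/'
--     """
--     a3m_keys = [k for k in keys if "/a3m/" in k]
--     if mode == "all_a3m":
--         return a3m_keys
--     # canonical
--     preferred = [k for k in a3m_keys if k.endswith("/a3m/uniclust30.a3m")]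
--     if preferred:
--         return preferred
--     return a3m_keys[:1]  # fallback within the group to a single A3M file
-- ===== SOURCE B (Python) =====
-- def filter_keys_for_download(keys, mode):
--     if mode == "all_a3m":
--         out = []
--         for k in keys:
--             if "/a3m/" in k:
--                 out.append(k)
--         return out
--     # canonical: one pass carrying the preferred list and the first a3m key seen
--     preferred = []
--     first_a3m = None
--     for k in keys:
--         if "/a3m/" in k:
--             if first_a3m is None:
--                 first_a3m = k
--             if k.endswith("/a3m/uniclust30.a3m"):
--                 preferred.append(k)
--     if preferred:
--         return preferred
--     return [] if first_a3m is None else [first_a3m]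
-- ===== Notes on version B (the rewrite author's own statement) =====
-- stated objective: alternative
-- what changed: Replaced A's two list comprehensions plus a slice fallback with a single pass per mode: the canonical branch carries explicit state (the preferred matches and the first a3m key seen) instead of building the full a3m list and filtering it again.
import Mathlib
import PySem

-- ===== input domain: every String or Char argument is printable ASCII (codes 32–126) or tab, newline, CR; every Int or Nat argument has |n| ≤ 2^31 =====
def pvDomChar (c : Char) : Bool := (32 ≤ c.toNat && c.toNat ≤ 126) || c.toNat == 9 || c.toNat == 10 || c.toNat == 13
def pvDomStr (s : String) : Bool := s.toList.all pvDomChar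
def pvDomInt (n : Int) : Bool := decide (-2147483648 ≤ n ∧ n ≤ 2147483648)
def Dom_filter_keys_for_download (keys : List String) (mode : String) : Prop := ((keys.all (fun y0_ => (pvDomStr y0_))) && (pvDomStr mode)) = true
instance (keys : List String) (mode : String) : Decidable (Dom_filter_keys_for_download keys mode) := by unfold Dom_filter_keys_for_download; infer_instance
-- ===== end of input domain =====

-- B makes one pass per mode with explicit state instead of A's layered comprehensions; objective: alternative decomposition, same cost.

-- ===== PORT A =====
def filter_keys_for_download (keys : List String) (mode : String) : List String :=
  let a3m_keys := keys.filter (fun k => PySem.Str.isIn "/a3m/" k)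
  if mode == "all_a3m" then a3m_keys
  else
    let preferred := a3m_keys.filter (fun k => PySem.Str.endswith k "/a3m/uniclust30.a3m")
    if preferred ≠ [] then preferred
    else PySem.List.slice a3m_keys none (some 1)

-- ===== PORT B =====
-- single canonical-mode loop: state = (preferred so far, first a3m key seen or none)
def fkdCanonLoop : List String → List String → Option String → List String × Option String
  | [], pref, first => (pref, first)
  | k :: rest, pref, first =>
    if PySem.Str.isIn "/a3m/" k then
      fkdCanonLoop rest
        (if PySem.Str.endswith k "/a3m/uniclust30.a3m" then pref ++ [k] else pref)
        (if first.isNone then some k else first)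
    else fkdCanonLoop rest pref first

def filter_keys_for_download_alt (keys : List String) (mode : String) : List String :=
  if mode == "all_a3m" then
    keys.foldl (fun acc k => if PySem.Str.isIn "/a3m/" k then acc ++ [k] else acc) []
  else
    match fkdCanonLoop keys [] none with
    | (pref, first) =>
      if pref ≠ [] then pref
      else match first with
        | some k => [k]
        | none => []

-- ===== PRECONDITION & SPEC =====
def Spec_filter_keys_for_download (keys : List String) (mode : String) (out : List String) : Prop := out = filter_keys_for_download_alt keys mode
instance (keys : List String) (mode : String) (out : List String) : Decidable (Spec_filter_keys_for_download keys mode out) := by unfold Spec_filter_keys_for_download; infer_instance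

-- ===== CLAIM (what is proved, stated in full; the proofs are below) =====
def Claim_equal_filter_keys_for_download : Prop := ∀ (keys : List String) (mode : String), Dom_filter_keys_for_download keys mode → Spec_filter_keys_for_download keys mode (filter_keys_for_download keys mode)

-- ===== LEMMAS AND PROOFS =====

theorem fkdCanonLoop_spec (keys : List String) (pref : List String) (first : Option String) :
    fkdCanonLoop keys pref first =
      (pref ++ (keys.filter (fun k => PySem.Str.isIn "/a3m/" k)).filter
          (fun k => PySem.Str.endswith k "/a3m/uniclust30.a3m"),
       if first.isNone then (keys.filter (fun k => PySem.Str.isIn "/a3m/" k)).head? else first) := by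
  induction keys generalizing pref first with
  | nil => cases first <;> simp [fkdCanonLoop]
  | cons k rest ih =>
    simp only [fkdCanonLoop]
    by_cases h : PySem.Str.isIn "/a3m/" k = true
    · rw [if_pos h, ih, List.filter_cons_of_pos (p := fun k => PySem.Str.isIn "/a3m/" k) h]
      by_cases he : PySem.Str.endswith k "/a3m/uniclust30.a3m" = true
      · rw [if_pos he,
          List.filter_cons_of_pos (p := fun k => PySem.Str.endswith k "/a3m/uniclust30.a3m") he]
        cases first <;> simp
      · rw [if_neg he,
          List.filter_cons_of_neg (p := fun k => PySem.Str.endswith k "/a3m/uniclust30.a3m") he]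
        cases first <;> simp
    · rw [if_neg h, ih, List.filter_cons_of_neg (p := fun k => PySem.Str.isIn "/a3m/" k) h]

theorem fkd_take_one (xs : List String) :
    PySem.List.slice xs none (some 1) =
      (match xs.head? with | some k => [k] | none => ([] : List String)) := by
  have h := PySem.List.slice_to_natCast (xs := xs) (b := 1)
  rw [show ((1 : Nat) : Int) = (1 : Int) from rfl] at h
  rw [h]
  cases xs <;> simp

-- ===== VERDICT (by name: the statement is the Claim_ definition above) =====
theorem filter_keys_for_download_spec : Claim_equal_filter_keys_for_download := by
  intro keys mode _
  unfold Spec_filter_keys_for_download filter_keys_for_download filter_keys_for_download_alt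
  by_cases hm : (mode == "all_a3m") = true
  · rw [if_pos hm, if_pos hm, PySem.List.foldl_append_if_eq_filter]
    rw [List.nil_append]
  · rw [if_neg hm, if_neg hm, fkdCanonLoop_spec]
    simp only [List.nil_append, Option.isNone_none, if_pos]
    by_cases hp : (keys.filter (fun k => PySem.Str.isIn "/a3m/" k)).filter
        (fun k => PySem.Str.endswith k "/a3m/uniclust30.a3m") = []
    · rw [if_neg (by simpa using hp), if_neg (by simpa using hp), fkd_take_one]
    · rw [if_pos (by simpa using hp), if_pos (by simpa using hp)]
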